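-- pv_equiv track=rewrite | github.com/tomrittervg/bwauth-tools | plot_data.py | index_of_nth_max
-- ===== SOURCE A (Python) =====
-- def index_of_nth_max(series, n):
-- 	maxes = []
-- 	for s in series:
-- 		for i in range(len(s)-1, 0, -1):
-- 			if s[i] != None:
-- 				maxes.append(i)
-- 				break
-- 	maxes.sort()
-- 	maxes.reverse()
-- 	return maxes[n]
-- ===== SOURCE B (Python) =====
-- def index_of_nth_max(series, n):
-- 	# Forward pass per series tracking the last non-None index (index 0 ignored),
-- 	# then one ascending sort and a single negative index instead of sort+reverse.
-- 	def last_idx(s):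
-- 		last = 0
-- 		for i, v in enumerate(s):
-- 			if i and v is not None:
-- 				last = i
-- 		return last
-- 	maxes = [j for j in map(last_idx, series) if j]
-- 	return sorted(maxes)[-n - 1]
-- ===== Notes on version B (the rewrite author's own statement) =====
-- stated objective: alternative
-- what changed: Each series is scanned forward once tracking the last non-None index (instead of scanning backward with a break), and the nth-largest pick is a single ascending sorted() with one negative index sorted(maxes)[-n-1] (instead of in-place sort, reverse, maxes[n]).
import Mathlib
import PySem

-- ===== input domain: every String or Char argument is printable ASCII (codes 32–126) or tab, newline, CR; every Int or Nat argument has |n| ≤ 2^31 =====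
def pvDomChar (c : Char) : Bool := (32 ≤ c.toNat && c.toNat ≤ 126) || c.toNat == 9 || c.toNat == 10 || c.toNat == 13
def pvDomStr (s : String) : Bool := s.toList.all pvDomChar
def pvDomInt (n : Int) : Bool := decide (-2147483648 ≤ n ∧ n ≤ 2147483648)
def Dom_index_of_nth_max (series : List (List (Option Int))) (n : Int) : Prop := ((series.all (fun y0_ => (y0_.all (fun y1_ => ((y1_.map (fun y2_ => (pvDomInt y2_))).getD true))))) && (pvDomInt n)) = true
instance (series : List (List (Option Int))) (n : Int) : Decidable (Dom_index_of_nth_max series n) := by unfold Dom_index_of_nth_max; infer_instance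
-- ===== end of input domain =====

-- B differs from A by a forward scan per series (tracking the last non-None index)
-- instead of a backward scan with break, and by one ascending sorted() with a single
-- negative index instead of sort+reverse+positive index; same values everywhere A returns.

-- ===== PORT A =====
-- inner 'for i in range(len(s)-1, 0, -1): if s[i] != None: maxes.append(i); break'
def pvAFind (s : List (Option Int)) (maxes : List Int) : List Int → List Int
  | [] => maxes
  | i :: rest =>
      if PySem.List.pyGetD s i none ≠ none then maxes ++ [i]
      else pvAFind s maxes rest

def index_of_nth_max (series : List (List (Option Int))) (n : Int) : Int :=
  let maxes := series.foldl
    (fun maxes s => pvAFind s maxes (PySem.List.pyRange ((s.length : Int) - 1) 0 (-1))) []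
  let maxes := PySem.List.sorted maxes (fun x => x) false   -- maxes.sort()
  let maxes := maxes.reverse                                 -- maxes.reverse()
  (PySem.List.pyGet? maxes n).getD 0                         -- maxes[n]; none = IndexError, outside Pre_

-- ===== PORT B =====
-- def last_idx(s): last = 0; for i, v in enumerate(s): if i and v is not None: last = i; return last
def pvLastIdx (s : List (Option Int)) : Int :=
  (PySem.List.enumerate s).foldl
    (fun last iv => if iv.1 ≠ 0 ∧ iv.2 ≠ none then iv.1 else last) 0

def index_of_nth_max_alt (series : List (List (Option Int))) (n : Int) : Int :=
  let maxes := (series.map pvLastIdx).filter (fun j => j ≠ 0)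
  (PySem.List.pyGet? (PySem.List.sorted maxes (fun x => x) false) (-n - 1)).getD 0
    -- sorted(maxes)[-n - 1]; none = IndexError, outside Pre_

-- ===== PRECONDITION & SPEC =====
-- Pre_ excludes exactly the inputs where A raises IndexError: n must index into maxes,
-- whose length is the number of series with a non-None entry at some index ≥ 1.
def Pre_index_of_nth_max (series : List (List (Option Int))) (n : Int) : Prop :=
  -(series.countP (fun s => (s.drop 1).any (fun v => v ≠ none)) : Int) ≤ n ∧
    n < (series.countP (fun s => (s.drop 1).any (fun v => v ≠ none)) : Int)
instance (series : List (List (Option Int))) (n : Int) : Decidable (Pre_index_of_nth_max series n) := by unfold Pre_index_of_nth_max; infer_instance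

def pvWitness_index_of_nth_max : List (List (Option Int)) × Int := ([[none, some 1], [some 2, none, some 3]], -1)

def Spec_index_of_nth_max (series : List (List (Option Int))) (n : Int) (out : Int) : Prop := out = index_of_nth_max_alt series n
instance (series : List (List (Option Int))) (n : Int) (out : Int) : Decidable (Spec_index_of_nth_max series n out) := by unfold Spec_index_of_nth_max; infer_instance

-- ===== CLAIM (what is proved, stated in full; the proofs are below) =====
def Claim_equal_index_of_nth_max : Prop := ∀ (series : List (List (Option Int))) (n : Int), Dom_index_of_nth_max series n → Pre_index_of_nth_max series n → Spec_index_of_nth_max series n (index_of_nth_max series n)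

-- ===== LEMMAS AND PROOFS =====

-- A's break-loop is find? over the scanned index list.
theorem pvAFind_eq_find? (s : List (Option Int)) (maxes : List Int) (l : List Int) :
    pvAFind s maxes l =
      maxes ++ (l.find? (fun i => decide (PySem.List.pyGetD s i none ≠ none))).toList := by
  induction l with
  | nil => simp [pvAFind]
  | cons i rest ih =>
      by_cases h : PySem.List.pyGetD s i none ≠ none <;>
        simp [pvAFind, h, ih]

-- keep-last-match fold = first match of the reversed list.
theorem pvFoldLast_eq_find? (q : Int → Bool) (l : List Int) (a : Int) :
    l.foldl (fun last j => if q j then j else last) a =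
      ((l.reverse.find? q).getD a) := by
  induction l generalizing a with
  | nil => simp
  | cons j rest ih =>
      simp only [List.foldl_cons, ih, List.reverse_cons, List.find?_append]
      cases h : rest.reverse.find? q <;> by_cases hq : q j <;> simp [hq]

-- B's forward scan equals first match over the descending full index range.
theorem pvLastIdx_eq (s : List (Option Int)) :
    pvLastIdx s =
      (((PySem.List.pyRange 0 (s.length : Int) 1).reverse.find?
          (fun j => decide (j ≠ 0 ∧ PySem.List.pyGetD s j none ≠ none))).getD 0) := by
  unfold pvLastIdx
  rw [PySem.List.enumerate_eq_map_pyRange (d := none), List.foldl_map]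
  simp only []
  have := pvFoldLast_eq_find? (fun j => decide (j ≠ 0 ∧ PySem.List.pyGetD s j none ≠ none))
      (PySem.List.pyRange 0 (s.length : Int) 1) 0
  simp only [decide_eq_true_eq] at this ⊢
  exact this

-- find? respects a pointwise-equal predicate.
theorem pvFind?_congr {p q : Int → Bool} (l : List Int) (h : ∀ x ∈ l, p x = q x) :
    l.find? p = l.find? q := by
  induction l with
  | nil => rfl
  | cons x rest ih =>
      have hx := h x (by simp)
      simp only [List.find?_cons, hx]
      cases hq : q x
      · exact ih (fun y hy => h y (by simp [hy]))
      · rfl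

-- per-series: A's contribution equals B's contribution.
theorem pvContrib_eq (s : List (Option Int)) (maxes : List Int) :
    pvAFind s maxes (PySem.List.pyRange ((s.length : Int) - 1) 0 (-1)) =
      maxes ++ (if pvLastIdx s ≠ 0 then [pvLastIdx s] else []) := by
  rw [pvAFind_eq_find?, pvLastIdx_eq]
  have hA : PySem.List.pyRange ((s.length : Int) - 1) 0 (-1)
      = (PySem.List.pyRange 1 (s.length : Int) 1).reverse := by
    rw [PySem.List.pyRange_neg_one_eq_reverse]; norm_num
  rw [hA]
  have hcongr : List.find? (fun j => decide (j ≠ 0 ∧ PySem.List.pyGetD s j none ≠ none))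
        (PySem.List.pyRange 1 (s.length : Int) 1).reverse
      = List.find? (fun i => decide (PySem.List.pyGetD s i none ≠ none))
        (PySem.List.pyRange 1 (s.length : Int) 1).reverse := by
    apply pvFind?_congr
    intro x hx
    have hx1 : 1 ≤ x := ((PySem.List.mem_pyRange_one).1 (List.mem_reverse.1 hx)).1
    simp [show x ≠ 0 by omega]
  rcases Nat.eq_zero_or_pos s.length with h0 | hpos
  · simp [h0, PySem.List.pyRange_one_eq_nil]
  · have hcons : PySem.List.pyRange 0 (s.length : Int) 1
        = 0 :: PySem.List.pyRange 1 (s.length : Int) 1 :=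
      PySem.List.pyRange_one_cons (by exact_mod_cast hpos)
    rw [hcons, List.reverse_cons, List.find?_append, hcongr]
    cases hf : List.find? (fun i => decide (PySem.List.pyGetD s i none ≠ none))
        (PySem.List.pyRange 1 (s.length : Int) 1).reverse with
    | none => simp
    | some i =>
        have hi : i ∈ (PySem.List.pyRange 1 (s.length : Int) 1).reverse :=
          List.mem_of_find?_eq_some hf
        have hi1 : 1 ≤ i := ((PySem.List.mem_pyRange_one).1 (List.mem_reverse.1 hi)).1
        simp [show ¬ i = 0 by omega]

-- whole collection step: A's maxes = B's maxes.
theorem pvMaxes_eq (series : List (List (Option Int))) (acc : List Int) :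
    series.foldl
      (fun maxes s => pvAFind s maxes (PySem.List.pyRange ((s.length : Int) - 1) 0 (-1))) acc =
      acc ++ (series.map pvLastIdx).filter (fun j => j ≠ 0) := by
  induction series generalizing acc with
  | nil => simp
  | cons s rest ih =>
      rw [List.foldl_cons, pvContrib_eq, ih]
      by_cases h : pvLastIdx s = 0 <;> simp [h]

-- reversed indexing: xs.reverse[n] = xs[-n-1], for every n (both none out of range).
theorem pvRev_pyGet? (xs : List Int) (n : Int) :
    PySem.List.pyGet? xs.reverse n = PySem.List.pyGet? xs (-n - 1) := by
  by_cases hin : -(xs.length : Int) ≤ n ∧ n < (xs.length : Int)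
  · by_cases hn : 0 ≤ n
    · -- n ≥ 0 : reverse[n] = xs[len - (n+1)]
      have hk : -n - 1 = -(((n.toNat + 1 : Nat) : Int)) := by omega
      rw [PySem.List.pyGet?_of_nonneg _ hn, hk,
        PySem.List.pyGet?_neg_natCast _ _ (by omega) (by omega)]
      have hlt : n.toNat < xs.length := by omega
      rw [List.getElem?_reverse hlt]
      congr 1
      omega
    · have hn : n < 0 := by omega
      -- n < 0 : reverse[-k] = xs[k-1]
      have hk : n = -(((-n).toNat : Nat) : Int) := by omega
      have hL : PySem.List.pyGet? xs.reverse n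
          = xs.reverse[xs.reverse.length - (-n).toNat]? := by
        conv_lhs => rw [hk]
        exact PySem.List.pyGet?_neg_natCast xs.reverse (-n).toNat (by omega) (by simp; omega)
      rw [hL, PySem.List.pyGet?_of_nonneg _ (show (0:Int) ≤ -n - 1 by omega)]
      rw [show xs.reverse.length - (-n).toNat = xs.length - (-n).toNat by simp]
      rw [List.getElem?_reverse (show xs.length - (-n).toNat < xs.length by omega)]
      congr 1
      omega
  · rw [(PySem.List.pyGet?_eq_none_iff _ _).2, (PySem.List.pyGet?_eq_none_iff _ _).2]
    · simp only [PySem.Raise.InRange]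
      omega
    · simp only [PySem.Raise.InRange, List.length_reverse]
      omega

-- ===== VERDICT (by name: the statement is the Claim_ definition above) =====
theorem index_of_nth_max_spec : Claim_equal_index_of_nth_max := by
  intro series n _ _
  unfold Spec_index_of_nth_max index_of_nth_max index_of_nth_max_alt
  simp only [pvMaxes_eq series [], List.nil_append, pvRev_pyGet?]
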